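-- pv_equiv track=rewrite | github.com/KinjalPatel1094/PYTHON-CODING-CHALLENGES | StringChallenges/separate_alpha_numeric.py | separate_alpha_numeric
-- ===== SOURCE A (Python) =====
-- def separate_alpha_numeric(s):
--
--     # Initialize empty strings to store alphabets and digits
--     alphabets = ""
--     digits = ""
--
--     # Iterate through each character in the input string
--     for char in s:
--         if char.isalpha():
--             alphabets += char
--         elif char.isdigit():
--             digits += char
--
--     return alphabets, digits
-- ===== SOURCE B (Python) =====
-- def separate_alpha_numeric(s):
--     alphabets = ''.join(c for c in s if c.isalpha())
--     digits = ''.join(c for c in s if c.isdigit())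
--     return alphabets, digits
-- ===== Notes on version B (the rewrite author's own statement) =====
-- stated objective: idiomatic
-- what changed: Replaced the single loop with two string accumulators by two independent filter-join passes, one per output.
import Mathlib
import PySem

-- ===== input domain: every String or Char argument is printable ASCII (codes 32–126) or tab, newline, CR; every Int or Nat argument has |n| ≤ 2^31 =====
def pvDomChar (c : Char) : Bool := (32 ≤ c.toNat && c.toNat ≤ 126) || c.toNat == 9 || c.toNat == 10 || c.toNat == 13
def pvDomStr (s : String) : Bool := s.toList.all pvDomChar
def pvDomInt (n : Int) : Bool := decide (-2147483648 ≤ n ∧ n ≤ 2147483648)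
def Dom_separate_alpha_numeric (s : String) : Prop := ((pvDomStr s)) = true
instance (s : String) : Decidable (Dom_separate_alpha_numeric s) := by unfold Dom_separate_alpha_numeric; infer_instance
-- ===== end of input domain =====

-- B replaces A's single loop with two string accumulators by two independent filter passes, one per output (idiomatic decomposition; same cost).
-- ===== PORT A =====
-- Port of A: one pass, pair of string accumulators.
def separate_alpha_numeric (s : String) : String × String :=
  s.toList.foldl
    (fun (acc : String × String) char =>
      if PySem.Chars.isalpha char then (acc.1.push char, acc.2)
      else if PySem.Chars.isdigit char then (acc.1, acc.2.push char)
      else acc)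
    ("", "")

-- ===== PORT B =====
-- Port of B: two independent filter-join passes.
def separate_alpha_numeric_alt (s : String) : String × String :=
  (String.ofList (s.toList.filter (fun c => PySem.Chars.isalpha c)),
   String.ofList (s.toList.filter (fun c => PySem.Chars.isdigit c)))

-- ===== PRECONDITION & SPEC =====
def Spec_separate_alpha_numeric (s : String) (out : String × String) : Prop := out = separate_alpha_numeric_alt s
instance (s : String) (out : String × String) : Decidable (Spec_separate_alpha_numeric s out) := by unfold Spec_separate_alpha_numeric; infer_instance

-- ===== CLAIM (what is proved, stated in full; the proofs are below) =====
def Claim_equal_separate_alpha_numeric : Prop := ∀ (s : String), Dom_separate_alpha_numeric s → Spec_separate_alpha_numeric s (separate_alpha_numeric s)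

-- ===== LEMMAS AND PROOFS =====

-- ===== VERDICT (by name: the statement is the Claim_ definition above) =====
lemma sep_fold (l : List Char) (a d : String) :
    l.foldl
      (fun (acc : String × String) char =>
        if PySem.Chars.isalpha char then (acc.1.push char, acc.2)
        else if PySem.Chars.isdigit char then (acc.1, acc.2.push char)
        else acc)
      (a, d)
    = (a ++ String.ofList (l.filter (fun c => PySem.Chars.isalpha c)),
       d ++ String.ofList (l.filter (fun c => PySem.Chars.isdigit c))) := by
  induction l generalizing a d with
  | nil =>
    apply Prod.ext <;> apply String.toList_inj.mp <;> simp
  | cons c t ih =>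
    by_cases hA : PySem.Chars.isalpha c
    · have hD : PySem.Chars.isdigit c = false := by
        unfold PySem.Chars.isalpha PySem.Chars.isupper PySem.Chars.islower at hA
        unfold PySem.Chars.isdigit
        simp [Char.le_def, UInt32.le_iff_toNat_le] at hA ⊢
        omega
      rw [List.foldl_cons]
      simp only [hA, hD, if_true, if_false, ih]
      apply Prod.ext <;> apply String.toList_inj.mp <;> simp [List.filter_cons, hA, hD]
    · by_cases hD : PySem.Chars.isdigit c
      · rw [List.foldl_cons]
        simp only [hA, hD, if_true, if_false, ih, Bool.false_eq_true]
        apply Prod.ext <;> apply String.toList_inj.mp <;> simp [List.filter_cons, hA, hD]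
      · rw [List.foldl_cons]
        simp only [hA, hD, if_false, ih, Bool.false_eq_true]
        apply Prod.ext <;> apply String.toList_inj.mp <;> simp [List.filter_cons, hA, hD]

-- ===== VERDICT =====
theorem separate_alpha_numeric_spec : Claim_equal_separate_alpha_numeric := by
  intro s _
  unfold Spec_separate_alpha_numeric separate_alpha_numeric separate_alpha_numeric_alt
  rw [sep_fold]
  apply Prod.ext <;> apply String.toList_inj.mp <;> simp
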